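-- pv_equiv track=rewrite | github.com/ochavarria/Proyectos-TEC | Progras/Python/Introduccion/Calendario.py | buscando_AyT
-- ===== SOURCE A (Python) =====
-- def buscando_AyT(lista,titulo,Apellido):
--     if(lista==[]):
--         return []
--     else:
--         if(pertenece(lista[0],titulo)and(pertenece(lista[0],Apellido))):
--             return lista[0]+buscando_AyT(lista[1:],titulo,Apellido)
--
--         else:
--             return buscando_AyT(lista[1:],titulo,Apellido)
--
-- def pertenece(lista,inp):
--     if(lista==[]):
--         return False
--     else:
--         if(lista[0]==inp):
--             return True
--         else:
--             return pertenece(lista[1:],inp)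
-- ===== SOURCE B (Python) =====
-- def buscando_AyT(lista, titulo, Apellido):
--     result = []
--     for sub in lista:
--         if any(x == titulo for x in sub) and any(x == Apellido for x in sub):
--             result.extend(sub)
--     return result
-- ===== Notes on version B (the rewrite author's own statement) =====
-- stated objective: simpler
-- what changed: Replaced the pair of recursive helpers (recursive membership check and recursive filter-concatenate with lista[1:] slicing) with a single iterative loop that extends an accumulator with each sublist containing both values.
import Mathlib
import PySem

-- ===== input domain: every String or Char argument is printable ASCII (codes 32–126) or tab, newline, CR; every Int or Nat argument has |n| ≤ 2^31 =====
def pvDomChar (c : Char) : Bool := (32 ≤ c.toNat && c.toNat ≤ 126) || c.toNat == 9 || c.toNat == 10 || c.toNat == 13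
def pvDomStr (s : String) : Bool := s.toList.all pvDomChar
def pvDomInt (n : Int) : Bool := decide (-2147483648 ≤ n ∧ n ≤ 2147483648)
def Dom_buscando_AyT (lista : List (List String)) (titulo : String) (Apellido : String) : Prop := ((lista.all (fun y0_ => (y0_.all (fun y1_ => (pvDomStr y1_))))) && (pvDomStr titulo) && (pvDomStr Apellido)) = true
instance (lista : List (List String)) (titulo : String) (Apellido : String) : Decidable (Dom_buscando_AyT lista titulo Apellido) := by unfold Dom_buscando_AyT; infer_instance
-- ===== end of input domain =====

-- B replaces the two recursive helpers by one iterative loop over the list with an accumulator; same return value.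
-- ===== PORT A =====
def pertenece (lista : List String) (inp : String) : Bool :=
  match lista with
  | [] => false
  | x :: rest => if x = inp then true else pertenece rest inp

def buscando_AyT (lista : List (List String)) (titulo : String) (Apellido : String) : List String :=
  match lista with
  | [] => []
  | sub :: rest =>
    if pertenece sub titulo && pertenece sub Apellido then
      sub ++ buscando_AyT rest titulo Apellido
    else
      buscando_AyT rest titulo Apellido

-- ===== PORT B =====
def buscando_AyT_alt (lista : List (List String)) (titulo : String) (Apellido : String) : List String :=
  lista.foldl (fun result sub =>
    if (sub.any (fun x => x = titulo)) && (sub.any (fun x => x = Apellido)) then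
      result ++ sub
    else
      result) []

-- ===== PRECONDITION & SPEC =====
def Spec_buscando_AyT (lista : List (List String)) (titulo : String) (Apellido : String) (out : List String) : Prop := out = buscando_AyT_alt lista titulo Apellido
instance (lista : List (List String)) (titulo : String) (Apellido : String) (out : List String) : Decidable (Spec_buscando_AyT lista titulo Apellido out) := by unfold Spec_buscando_AyT; infer_instance

-- ===== CLAIM (what is proved, stated in full; the proofs are below) =====
def Claim_equal_buscando_AyT : Prop := ∀ (lista : List (List String)) (titulo : String) (Apellido : String), Dom_buscando_AyT lista titulo Apellido → Spec_buscando_AyT lista titulo Apellido (buscando_AyT lista titulo Apellido)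

-- ===== LEMMAS AND PROOFS =====

-- ===== VERDICT (by name: the statement is the Claim_ definition above) =====
lemma pertenece_eq_any (lista : List String) (inp : String) :
    pertenece lista inp = lista.any (fun x => x = inp) := by
  induction lista with
  | nil => rfl
  | cons x rest ih => by_cases h : x = inp <;> simp [pertenece, h, ih]

lemma alt_foldl_acc (lista : List (List String)) (titulo Apellido : String) (acc : List String) :
    lista.foldl (fun result sub =>
      if (sub.any (fun x => x = titulo)) && (sub.any (fun x => x = Apellido)) then
        result ++ sub else result) acc
    = acc ++ buscando_AyT lista titulo Apellido := by
  induction lista generalizing acc with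
  | nil => simp [buscando_AyT]
  | cons sub rest ih =>
    simp only [List.foldl_cons, buscando_AyT, pertenece_eq_any]
    split_ifs with h
    · rw [ih]; simp
    · rw [ih]

theorem buscando_AyT_spec : Claim_equal_buscando_AyT := by
  intro lista titulo Apellido _
  unfold Spec_buscando_AyT buscando_AyT_alt
  rw [alt_foldl_acc]; simp
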